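-- pv_equiv track=rewrite | github.com/vvxyru/pyprojects | lab1/bus_routes.py | find_transfer_route
-- ===== SOURCE A (Python) =====
-- def find_transfer_route(
--         stops_dict: dict[str, str],
--         routes_dict: dict[str, list[str]],
--         starting_code: str,
--         destination_code: str
-- ) -> str:
--
--     starting_routes = {}
--     destination_routes = {}
--
--     transfer_stop = ""
--     transferA = ""
--     transferB = ""
--
--     # Routes containing start point
--     for bus_number, route_list in routes_dict.items():
--         if starting_code in route_list:
--             starting_routes[bus_number] = route_list
--
--     # Routes containing destination point
--     for bus_number, route_list in routes_dict.items():
--         if destination_code in route_list: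
--             destination_routes[bus_number] = route_list
--
--     # Find transfer stop
--     # This is so ugly im sorry
--     for rA_num, rA_list in starting_routes.items():
--         for stopA in rA_list:  # walk along starting route in order
--             for rB_num, rB_list in destination_routes.items():
--                 if rA_num != rB_num and stopA in rB_list:
--                     transfer_stop = stops_dict[stopA]
--                     transferA = rA_num
--                     transferB = rB_num
--                     transfer_message = (
--                         f"Take route {transferA} and get off at {transfer_stop}.\n"
--                         f"Then take route {transferB} to your destination.\n"
--                         f"\n"
--                         f"Route {transferB}: {rB_list}"
--                     )
--                     return transfer_message
--     return "No routes serving that start point and end point"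
-- ===== SOURCE B (Python) =====
-- def find_transfer_route(
--         stops_dict: dict[str, str],
--         routes_dict: dict[str, list[str]],
--         starting_code: str,
--         destination_code: str
-- ) -> str:
--     # Inverted index: stop code -> bus numbers (in routes_dict order) of routes
--     # that reach the destination.
--     index = {}
--     for bus, route in routes_dict.items():
--         if destination_code in route:
--             for stop in route:
--                 index.setdefault(stop, []).append(bus)
--
--     for bus, route in routes_dict.items():
--         if starting_code not in route:
--             continue
--         for stop in route:
--             other = next((b for b in index.get(stop, []) if b != bus), None)
--             if other is not None:
--                 return (
--                     f"Take route {bus} and get off at {stops_dict[stop]}.\n"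
--                     f"Then take route {other} to your destination.\n"
--                     f"\n"
--                     f"Route {other}: {routes_dict[other]}"
--                 )
--     return "No routes serving that start point and end point"
-- ===== Notes on version B (the rewrite author's own statement) =====
-- stated objective: alternative
-- what changed: B replaces A's two precomputed route dicts and triple-nested scan (every stop of every start route against every destination route) with an inverted index built once, mapping each stop to the bus numbers of destination routes serving it, so finding the transfer bus is a single index lookup per stop followed by routes_dict[other] for the message.
import Mathlib
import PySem

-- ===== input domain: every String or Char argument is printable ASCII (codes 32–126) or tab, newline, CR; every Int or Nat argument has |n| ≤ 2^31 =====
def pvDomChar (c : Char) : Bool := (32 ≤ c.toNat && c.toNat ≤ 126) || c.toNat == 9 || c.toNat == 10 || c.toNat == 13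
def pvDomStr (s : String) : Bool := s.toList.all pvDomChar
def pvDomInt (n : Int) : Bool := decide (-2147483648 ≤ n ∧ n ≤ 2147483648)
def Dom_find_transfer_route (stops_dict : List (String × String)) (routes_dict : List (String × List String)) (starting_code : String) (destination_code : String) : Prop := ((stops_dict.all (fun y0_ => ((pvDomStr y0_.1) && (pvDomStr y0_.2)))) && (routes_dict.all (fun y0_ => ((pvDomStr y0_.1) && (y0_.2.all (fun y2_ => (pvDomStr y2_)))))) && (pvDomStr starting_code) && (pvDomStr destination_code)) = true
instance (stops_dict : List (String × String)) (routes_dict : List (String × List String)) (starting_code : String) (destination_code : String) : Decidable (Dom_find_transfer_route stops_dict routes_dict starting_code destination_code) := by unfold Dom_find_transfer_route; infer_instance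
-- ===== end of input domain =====

-- B replaces A's triple-nested scan over all destination routes with an inverted index
-- (stop -> destination-route bus numbers), built once; same return value (objective: alternative).

-- Shared formatting helpers (Python's f-string rendering of a list of strings, i.e. str(list)):
-- pvReprStrChars is Python's repr() of a str, exact on printable ASCII + tab/newline/CR.
def pvReprStrChars (cs : List Char) : List Char :=
  let q : Char := if cs.contains '\'' && !(cs.contains '"') then '"' else '\''
  q :: (cs.flatMap (fun c =>
    if c = '\\' then ['\\', '\\']
    else if c = q then ['\\', q]
    else if c = '\t' then ['\\', 't']
    else if c = '\n' then ['\\', 'n']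
    else if c = '\r' then ['\\', 'r']
    else [c]) ++ [q])

-- str(xs) for a Python list of str: '[' + ', '.join(repr(x)) + ']'
def pvStrOfStrList (xs : List String) : String :=
  String.ofList ('[' :: (List.intercalate [',', ' '] (xs.map (fun s => pvReprStrChars s.toList)) ++ [']']))

-- the transfer_message f-string (built over List Char so the kernel can evaluate it)
def pvMsg (tA tStop tB : String) (rB_list : List String) : String :=
  String.ofList ("Take route ".toList ++ tA.toList ++ " and get off at ".toList ++ tStop.toList
    ++ ".\nThen take route ".toList ++ tB.toList ++ " to your destination.\n\nRoute ".toList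
    ++ tB.toList ++ ": ".toList ++ (pvStrOfStrList rB_list).toList)

-- ===== PORT A =====
-- innermost loop: for rB_num, rB_list in destination_routes.items()
-- stops_dict[stopA] raises KeyError when absent; Pre_ excludes that, .getD "" is the total stand-in.
def pvA_inner (stops_dict : List (String × String)) (rA_num stopA : String) :
    List (String × List String) → Option String
  | [] => none
  | (rB_num, rB_list) :: rest =>
    if rA_num ≠ rB_num ∧ stopA ∈ rB_list then
      some (pvMsg rA_num (((PySem.Dict.mk stops_dict).get? stopA).getD "") rB_num rB_list)
    else pvA_inner stops_dict rA_num stopA rest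

-- middle loop: for stopA in rA_list
def pvA_walk (stops_dict : List (String × String)) (dest_routes : List (String × List String))
    (rA_num : String) : List String → Option String
  | [] => none
  | stopA :: rest =>
    match pvA_inner stops_dict rA_num stopA dest_routes with
    | some m => some m
    | none => pvA_walk stops_dict dest_routes rA_num rest

-- outer loop: for rA_num, rA_list in starting_routes.items()
def pvA_outer (stops_dict : List (String × String)) (dest_routes : List (String × List String)) :
    List (String × List String) → Option String
  | [] => none
  | (rA_num, rA_list) :: rest =>
    match pvA_walk stops_dict dest_routes rA_num rA_list with
    | some m => some m
    | none => pvA_outer stops_dict dest_routes rest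

def find_transfer_route (stops_dict : List (String × String)) (routes_dict : List (String × List String)) (starting_code : String) (destination_code : String) : String :=
  let starting_routes :=
    routes_dict.foldl (fun d p => if starting_code ∈ p.2 then d.insert p.1 p.2 else d) (PySem.Dict.mk [])
  let destination_routes :=
    routes_dict.foldl (fun d p => if destination_code ∈ p.2 then d.insert p.1 p.2 else d) (PySem.Dict.mk [])
  match pvA_outer stops_dict destination_routes.items starting_routes.items with
  | some m => m
  | none => "No routes serving that start point and end point"

-- ===== PORT B =====
-- inverted index: stop -> bus numbers (routes_dict order) of routes containing destination_code
-- (index.setdefault(stop, []).append(bus) is Dict.modify stop [] (· ++ [bus]))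
def pvB_index (destination_code : String) (routes_dict : List (String × List String)) :
    PySem.Dict String (List String) :=
  routes_dict.foldl (fun d p =>
    if destination_code ∈ p.2 then p.2.foldl (fun d s => d.modify s [] (· ++ [p.1])) d else d)
    (PySem.Dict.mk [])

-- for stop in route: first indexed bus ≠ bus; stops_dict[stop] as in A (.getD "" stand-in, Pre_ guards)
def pvB_walk (stops_dict : List (String × String)) (routes_dict : List (String × List String))
    (idx : PySem.Dict String (List String)) (bus : String) : List String → Option String
  | [] => none
  | stop :: rest =>
    match (idx.getD stop []).find? (fun b => b != bus) with
    | some other =>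
        some (pvMsg bus (((PySem.Dict.mk stops_dict).get? stop).getD "") other
          ((PySem.Dict.mk routes_dict).getD other []))
    | none => pvB_walk stops_dict routes_dict idx bus rest

-- for bus, route in routes_dict.items(): skip routes without the start
def pvB_outer (stops_dict : List (String × String)) (routes_dict : List (String × List String))
    (idx : PySem.Dict String (List String)) (starting_code : String) :
    List (String × List String) → Option String
  | [] => none
  | (bus, route) :: rest =>
    if starting_code ∈ route then
      match pvB_walk stops_dict routes_dict idx bus route with
      | some m => some m
      | none => pvB_outer stops_dict routes_dict idx starting_code rest
    else pvB_outer stops_dict routes_dict idx starting_code rest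

def find_transfer_route_alt (stops_dict : List (String × String)) (routes_dict : List (String × List String)) (starting_code : String) (destination_code : String) : String :=
  match pvB_outer stops_dict routes_dict (pvB_index destination_code routes_dict) starting_code routes_dict with
  | some m => m
  | none => "No routes serving that start point and end point"

-- ===== PRECONDITION & SPEC =====
-- Pre_ excludes (a) association lists with duplicate route keys (they do not arise from a Python
-- dict argument), and (b) inputs where some stop shared by a start route and a different
-- destination route is missing from stops_dict: at such a stop A's stops_dict[stopA] raises
-- KeyError (the clause covers every candidate transfer stop, so it is slightly narrower than the
-- raising set — see the cite).
def Pre_find_transfer_route (stops_dict : List (String × String)) (routes_dict : List (String × List String)) (starting_code : String) (destination_code : String) : Prop :=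
  (routes_dict.map Prod.fst).Nodup ∧
  ∀ p ∈ routes_dict, ∀ q ∈ routes_dict, starting_code ∈ p.2 → destination_code ∈ q.2 →
    p.1 ≠ q.1 → ∀ s ∈ p.2, s ∈ q.2 → s ∈ stops_dict.map Prod.fst
instance (stops_dict : List (String × String)) (routes_dict : List (String × List String)) (starting_code : String) (destination_code : String) : Decidable (Pre_find_transfer_route stops_dict routes_dict starting_code destination_code) := by unfold Pre_find_transfer_route; infer_instance

def pvWitness_find_transfer_route : (List (String × String)) × (List (String × List String)) × String × String :=
  ([("a", "Alpha")], [("1", ["x", "a"]), ("2", ["a", "y"])], "x", "y")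

def Spec_find_transfer_route (stops_dict : List (String × String)) (routes_dict : List (String × List String)) (starting_code : String) (destination_code : String) (out : String) : Prop := out = find_transfer_route_alt stops_dict routes_dict starting_code destination_code
instance (stops_dict : List (String × String)) (routes_dict : List (String × List String)) (starting_code : String) (destination_code : String) (out : String) : Decidable (Spec_find_transfer_route stops_dict routes_dict starting_code destination_code out) := by unfold Spec_find_transfer_route; infer_instance

-- ===== CLAIM (what is proved, stated in full; the proofs are below) =====
def Claim_equal_find_transfer_route : Prop := ∀ (stops_dict : List (String × String)) (routes_dict : List (String × List String)) (starting_code : String) (destination_code : String), Dom_find_transfer_route stops_dict routes_dict starting_code destination_code → Pre_find_transfer_route stops_dict routes_dict starting_code destination_code → Spec_find_transfer_route stops_dict routes_dict starting_code destination_code (find_transfer_route stops_dict routes_dict starting_code destination_code)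

-- ===== LEMMAS AND PROOFS =====

-- A's dict-building loops: with nodup, fresh keys, they append = List.filter.
lemma pv_build_items (c : String × List String → Prop) [DecidablePred c] :
    ∀ (l : List (String × List String)) (d : PySem.Dict String (List String)),
      (l.map Prod.fst).Nodup → (∀ p ∈ l, d.contains p.1 = false) →
      (l.foldl (fun d p => if c p then d.insert p.1 p.2 else d) d).items
        = d.items ++ l.filter (fun p => decide (c p)) := by
  intro l
  induction l with
  | nil => simp
  | cons p rest ih =>
    intro d hnd hfresh
    simp only [List.foldl_cons]
    by_cases hc : c p
    · rw [if_pos hc]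
      have hfr : d.contains p.1 = false := hfresh p (List.mem_cons_self ..)
      have hrest : ∀ q ∈ rest, (d.insert p.1 p.2).contains q.1 = false := by
        intro q hq
        rw [PySem.Dict.contains_insert]
        have hnotin : p.1 ∉ rest.map Prod.fst := by
          have h2 := List.nodup_cons.mp (show (p.1 :: rest.map Prod.fst).Nodup by simpa using hnd)
          exact h2.1
        have hne : q.1 ≠ p.1 := fun h => hnotin (h ▸ List.mem_map_of_mem hq)
        simp [hne, hfresh q (List.mem_cons_of_mem _ hq)]
      rw [ih (d.insert p.1 p.2) (by simpa using hnd.of_cons) hrest,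
        PySem.Dict.items_insert_of_not_contains d p.2 hfr]
      simp [hc]
    · rw [if_neg hc]
      rw [ih d (by simpa using hnd.of_cons) (fun q hq => hfresh q (List.mem_cons_of_mem _ hq))]
      simp [hc]

-- index building, inner loop over one route list
lemma pv_idx_route (bus s : String) :
    ∀ (lst : List String) (d : PySem.Dict String (List String)),
      (lst.foldl (fun d s' => d.modify s' [] (· ++ [bus])) d).getD s []
        = d.getD s [] ++ (lst.filter (· == s)).map (fun _ => bus) := by
  intro lst
  induction lst with
  | nil => simp
  | cons s' rest ih =>
    intro d
    simp only [List.foldl_cons]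
    rw [ih, PySem.Dict.getD_modify]
    by_cases h : s = s'
    · subst h; simp
    · simp [h, Ne.symm h]

-- index building, outer loop
lemma pv_idx_getD (destination_code s : String) :
    ∀ (l : List (String × List String)) (d : PySem.Dict String (List String)),
      (l.foldl (fun d p =>
          if destination_code ∈ p.2 then p.2.foldl (fun d s' => d.modify s' [] (· ++ [p.1])) d else d) d).getD s []
        = d.getD s []
          ++ (l.filter (fun p => decide (destination_code ∈ p.2))).flatMap
              (fun p => (p.2.filter (· == s)).map (fun _ => p.1)) := by
  intro l
  induction l with
  | nil => simp
  | cons p rest ih =>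
    intro d
    simp only [List.foldl_cons]
    by_cases h : destination_code ∈ p.2
    · rw [if_pos h, ih, pv_idx_route]
      simp [h]
    · rw [if_neg h, ih]
      simp [h]

-- find? over a constant-mapped block ++ rest
lemma pv_find_const_append {α β : Type} (c : α) (p : α → Bool) (l' : List β) (rest : List α) :
    ((l'.map (fun _ => c)) ++ rest).find? p
      = if l'.isEmpty then rest.find? p else (if p c then some c else rest.find? p) := by
  induction l' with
  | nil => simp
  | cons b l'' ih =>
    simp only [List.map_cons, List.cons_append, List.find?_cons, List.isEmpty_cons]
    by_cases hp : p c
    · simp [hp]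
    · simp only [hp, Bool.false_eq_true, if_false] at ih ⊢
      rw [ih]
      split_ifs <;> rfl

-- first bus ≠ rA in the concatenated index entry = first destination route that works
lemma pv_find_flat (rA s : String) :
    ∀ (l : List (String × List String)),
      ((l.flatMap (fun p => (p.2.filter (· == s)).map (fun _ => p.1))).find? (fun b => b != rA))
        = (l.find? (fun q => (q.1 != rA) && decide (s ∈ q.2))).map Prod.fst := by
  intro l
  induction l with
  | nil => simp
  | cons p rest ih =>
    simp only [List.flatMap_cons, List.find?_cons]
    rw [pv_find_const_append, ih]
    by_cases hs : s ∈ p.2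
    · have hne : ¬ (p.2.filter (· == s)).isEmpty := by
        simp only [List.isEmpty_iff, List.filter_eq_nil_iff]
        intro hall
        exact hall s hs (by simp)
      by_cases hb : p.1 != rA
      · simp [hne, hb, hs]
      · simp at hb
        simp [hne, hb, hs]
    · have he : (p.2.filter (· == s)).isEmpty := by
        simp only [List.isEmpty_iff, List.filter_eq_nil_iff]
        intro a ha hq
        have hsa : a = s := by simpa using hq
        exact hs (hsa ▸ ha)
      simp [he, hs]

-- A's innermost loop as a find?
lemma pv_A_inner_eq (stops_dict : List (String × String)) (rA s : String) :
    ∀ (dr : List (String × List String)),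
      pvA_inner stops_dict rA s dr
        = (dr.find? (fun q => (q.1 != rA) && decide (s ∈ q.2))).map
            (fun q => pvMsg rA (((PySem.Dict.mk stops_dict).get? s).getD "") q.1 q.2) := by
  intro dr
  induction dr with
  | nil => simp [pvA_inner]
  | cons q rest ih =>
    obtain ⟨rB, rBl⟩ := q
    by_cases h : rA ≠ rB ∧ s ∈ rBl
    · rw [List.find?_cons_of_pos (by simp [bne_iff_ne, Ne.symm h.1, h.2])]
      simp only [pvA_inner]
      rw [if_pos h]
      rfl
    · rw [List.find?_cons_of_neg ?_]
      · simp only [pvA_inner]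
        rw [if_neg h]
        exact ih
      · simp only [Bool.and_eq_true, bne_iff_ne, decide_eq_true_eq, not_and]
        exact fun hne hs => absurd ⟨Ne.symm hne, hs⟩ h

-- the two per-stop computations agree (given nodup route keys)
lemma pv_step_eq (stops_dict : List (String × String)) (routes_dict : List (String × List String))
    (hnd : (routes_dict.map Prod.fst).Nodup) (bus s : String) :
    pvA_inner stops_dict bus s (routes_dict.filter (fun p => decide (destination_code ∈ p.2)))
      = (((pvB_index destination_code routes_dict).getD s []).find? (fun b => b != bus)).map
          (fun other => pvMsg bus (((PySem.Dict.mk stops_dict).get? s).getD "") other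
            ((PySem.Dict.mk routes_dict).getD other [])) := by
  rw [pv_A_inner_eq]
  rw [show (pvB_index destination_code routes_dict).getD s []
      = (routes_dict.filter (fun p => decide (destination_code ∈ p.2))).flatMap
          (fun p => (p.2.filter (· == s)).map (fun _ => p.1)) from by
    simpa using pv_idx_getD destination_code s routes_dict (PySem.Dict.mk [])]
  rw [pv_find_flat]
  cases hfind : (routes_dict.filter (fun p => decide (destination_code ∈ p.2))).find?
      (fun q => (q.1 != bus) && decide (s ∈ q.2)) with
  | none => simp
  | some q =>
    have hmem : q ∈ routes_dict := List.mem_of_mem_filter (List.mem_of_find?_eq_some hfind)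
    have : (PySem.Dict.mk routes_dict).getD q.1 [] = q.2 :=
      PySem.Dict.getD_of_mem_items (PySem.Dict.mk routes_dict) hmem hnd []
    simp [this]

-- the two middle loops agree
lemma pv_walk_eq (stops_dict : List (String × String)) (routes_dict : List (String × List String))
    (destination_code : String) (hnd : (routes_dict.map Prod.fst).Nodup) (bus : String) :
    ∀ (lst : List String),
      pvA_walk stops_dict (routes_dict.filter (fun p => decide (destination_code ∈ p.2))) bus lst
        = pvB_walk stops_dict routes_dict (pvB_index destination_code routes_dict) bus lst := by
  intro lst
  induction lst with
  | nil => rfl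
  | cons s rest ih =>
    simp only [pvA_walk, pvB_walk]
    rw [pv_step_eq stops_dict routes_dict hnd bus s, ih]
    cases (((pvB_index destination_code routes_dict).getD s []).find? (fun b => b != bus)) <;> simp

-- the two outer loops agree
lemma pv_outer_eq (stops_dict : List (String × String)) (routes_dict : List (String × List String))
    (starting_code destination_code : String) (hnd : (routes_dict.map Prod.fst).Nodup) :
    ∀ (l : List (String × List String)),
      pvA_outer stops_dict (routes_dict.filter (fun p => decide (destination_code ∈ p.2)))
          (l.filter (fun p => decide (starting_code ∈ p.2)))
        = pvB_outer stops_dict routes_dict (pvB_index destination_code routes_dict) starting_code l := by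
  intro l
  induction l with
  | nil => rfl
  | cons p rest ih =>
    obtain ⟨bus, route⟩ := p
    simp only [List.filter_cons]
    by_cases h : starting_code ∈ route
    · rw [if_pos (by simpa using h)]
      simp only [pvA_outer, pvB_outer]
      rw [if_pos h, pv_walk_eq stops_dict routes_dict destination_code hnd bus route, ih]
    · rw [if_neg (by simpa using h)]
      simp only [pvB_outer]
      rw [if_neg h]
      exact ih

-- ===== VERDICT (by name: the statement is the Claim_ definition above) =====
theorem find_transfer_route_spec : Claim_equal_find_transfer_route := by
  intro stops_dict routes_dict starting_code destination_code _hdom hpre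
  obtain ⟨hnd, _⟩ := hpre
  unfold Spec_find_transfer_route find_transfer_route find_transfer_route_alt
  show (match pvA_outer stops_dict
      (routes_dict.foldl (fun d p => if destination_code ∈ p.2 then d.insert p.1 p.2 else d) (PySem.Dict.mk [])).items
      (routes_dict.foldl (fun d p => if starting_code ∈ p.2 then d.insert p.1 p.2 else d) (PySem.Dict.mk [])).items with
    | some m => m
    | none => "No routes serving that start point and end point")
    = match pvB_outer stops_dict routes_dict (pvB_index destination_code routes_dict) starting_code routes_dict with
    | some m => m
    | none => "No routes serving that start point and end point"
  rw [pv_build_items (fun p => starting_code ∈ p.2) routes_dict (PySem.Dict.mk []) hnd (by simp),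
    pv_build_items (fun p => destination_code ∈ p.2) routes_dict (PySem.Dict.mk []) hnd (by simp)]
  simp only [List.nil_append]
  rw [pv_outer_eq stops_dict routes_dict starting_code destination_code hnd routes_dict]
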